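-- pv_equiv track=rewrite | github.com/E-W-Jones/AoC2023 | Day 14/day14.py | calculate_runs_north_south
-- ===== SOURCE A (Python) =====
-- def calculate_runs_north_south(grid):
--     runs = []
--     run = []
--     for j in range(len(grid[0])):
--         run = []
--         for i in range(len(grid)):
--             if grid[i][j] == "#":
--                 if run:
--                     runs.append(run)
--                 run = []
--             else:
--                 run.append((i, j))
--         else:
--             if run:
--                 runs.append(run)
--                 run = []
--     return runs
-- ===== SOURCE B (Python) =====
-- def calculate_runs_north_south(grid):
--     width = len(grid[0])
--     walls = [0] * width          # walls[j] = number of '#' seen so far in column j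
--     tagged = []                  # ((column, walls-above), cell) for every non-wall cell
--     for i in range(len(grid)):
--         for j in range(width):
--             if grid[i][j] == "#":
--                 walls[j] += 1
--             else:
--                 tagged.append(((j, walls[j]), (i, j)))
--     groups = {}
--     for key, cell in tagged:
--         groups.setdefault(key, []).append(cell)
--     return [groups[key] for key in sorted(groups)]
-- ===== Notes on version B (the rewrite author's own statement) =====
-- stated objective: alternative
-- what changed: B abandons A's per-column run-buffer state machine: it labels every non-wall cell with a run id (column, number-of-walls-above) in one row-major tagging pass, groups the tagged cells in a dictionary keyed by run id, and emits the groups in sorted key order, which restores column-major run order.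
import Mathlib
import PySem

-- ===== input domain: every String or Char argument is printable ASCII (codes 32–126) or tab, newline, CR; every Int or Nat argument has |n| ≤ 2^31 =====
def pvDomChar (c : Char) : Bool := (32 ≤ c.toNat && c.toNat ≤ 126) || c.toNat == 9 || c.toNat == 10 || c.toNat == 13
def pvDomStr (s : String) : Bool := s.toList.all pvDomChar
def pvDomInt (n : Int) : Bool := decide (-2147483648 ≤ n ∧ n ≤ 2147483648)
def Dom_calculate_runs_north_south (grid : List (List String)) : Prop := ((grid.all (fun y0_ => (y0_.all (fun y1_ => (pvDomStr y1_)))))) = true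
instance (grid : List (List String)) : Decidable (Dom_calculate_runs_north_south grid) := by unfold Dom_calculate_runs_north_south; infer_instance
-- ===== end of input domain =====

-- B replaces A's per-column run-buffer state machine by tagging each non-wall cell with a
-- run id (column, walls-above), grouping the tags in a dictionary, and emitting the groups
-- in sorted key order (objective: alternative).

-- cell access shared by both ports; inside Pre_ the indices are in range, so the defaults are never hit
def pvCell (grid : List (List String)) (i j : Nat) : String := (grid.getD i []).getD j ""

-- ===== PORT A =====
-- one step of A's inner loop over rows: wall flushes the current run, otherwise extend it
def aStep (grid : List (List String)) (j : Nat)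
    (p : List (List (Int × Int)) × List (Int × Int)) (i : Nat) :
    List (List (Int × Int)) × List (Int × Int) :=
  if pvCell grid i j = "#" then
    (if p.2 ≠ [] then p.1 ++ [p.2] else p.1, [])
  else (p.1, p.2 ++ [((i : Int), (j : Int))])

-- the for-else flush at the end of each column
def aFlush (p : List (List (Int × Int)) × List (Int × Int)) : List (List (Int × Int)) :=
  if p.2 ≠ [] then p.1 ++ [p.2] else p.1

def calculate_runs_north_south (grid : List (List String)) : List (List (Int × Int)) :=
  (List.range (grid.headD []).length).foldl (fun runs j =>
    aFlush ((List.range grid.length).foldl (aStep grid j) (runs, []))) []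

-- ===== PORT B =====
-- one step of B's tagging pass at cell (i, j): a wall bumps walls[j], any other cell is
-- tagged with its run id (j, walls[j])
def bStep (grid : List (List String)) (i : Nat)
    (st : List Int × List ((Int × Int) × (Int × Int))) (j : Nat) :
    List Int × List ((Int × Int) × (Int × Int)) :=
  if pvCell grid i j = "#" then (st.1.set j (st.1.getD j 0 + 1), st.2)
  else (st.1, st.2 ++ [(((j : Int), st.1.getD j 0), ((i : Int), (j : Int)))])

-- the row-major tagging pass: ((column, walls-above), cell) for every non-wall cell
def bTagged (grid : List (List String)) : List ((Int × Int) × (Int × Int)) :=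
  ((List.range grid.length).foldl
    (fun st i => (List.range (grid.headD []).length).foldl (bStep grid i) st)
    (List.replicate (grid.headD []).length 0, [])).2

-- grouping pass: groups.setdefault(key, []).append(cell)
def bGroups (grid : List (List String)) : PySem.Dict (Int × Int) (List (Int × Int)) :=
  (bTagged grid).foldl (fun d p => d.modify p.1 [] fun x => x ++ [p.2]) PySem.Dict.empty

-- [groups[key] for key in sorted(groups)]; every key is in the dict, so getD's default is never hit
def calculate_runs_north_south_alt (grid : List (List String)) : List (List (Int × Int)) :=
  (PySem.List.sorted2 (bGroups grid).keys Prod.fst Prod.snd).map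
    (fun key => (bGroups grid).getD key [])

-- ===== PRECONDITION & SPEC =====
-- Pre_ excludes exactly the inputs on which the Python A raises IndexError:
-- the empty grid (grid[0]) and grids with a row shorter than the first row (grid[i][j]).
def Pre_calculate_runs_north_south (grid : List (List String)) : Prop :=
  grid ≠ [] ∧ ∀ r ∈ grid, (grid.headD []).length ≤ r.length
instance (grid : List (List String)) : Decidable (Pre_calculate_runs_north_south grid) := by
  unfold Pre_calculate_runs_north_south; infer_instance

def pvWitness_calculate_runs_north_south : List (List String) :=
  [[".", "#"], ["#", "."], [".", "."]]

def Spec_calculate_runs_north_south (grid : List (List String)) (out : List (List (Int × Int))) : Prop := out = calculate_runs_north_south_alt grid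
instance (grid : List (List String)) (out : List (List (Int × Int))) : Decidable (Spec_calculate_runs_north_south grid out) := by unfold Spec_calculate_runs_north_south; infer_instance

-- ===== CLAIM (what is proved, stated in full; the proofs are below) =====
def Claim_equal_calculate_runs_north_south : Prop := ∀ (grid : List (List String)), Dom_calculate_runs_north_south grid → Pre_calculate_runs_north_south grid → Spec_calculate_runs_north_south grid (calculate_runs_north_south grid)

-- ===== LEMMAS AND PROOFS =====

-- proof-side vocabulary: wall count above row i in column j, and the run with id (j, r)
def wc (grid : List (List String)) (j i : Nat) : Nat :=
  (List.range i).countP (fun k => pvCell grid k j = "#")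

def pc (grid : List (List String)) (j r i : Nat) : List (Int × Int) :=
  (List.range i).filterMap (fun k =>
    if pvCell grid k j ≠ "#" ∧ wc grid j k = r then some ((k : Int), (j : Int)) else none)

def tagOf (grid : List (List String)) (i j : Nat) : Option ((Int × Int) × (Int × Int)) :=
  if pvCell grid i j ≠ "#" then
    some (((j : Int), (wc grid j i : Int)), ((i : Int), (j : Int)))
  else none

def KL (grid : List (List String)) (j : Nat) : List Nat :=
  (List.range (grid.length + 1)).filter (fun r => pc grid j r grid.length ≠ [])

def KLpairs (grid : List (List String)) : List (Int × Int) :=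
  (List.range (grid.headD []).length).flatMap
    (fun j => (KL grid j).map (fun r : Nat => ((j : Int), (r : Int))))

def specRuns (grid : List (List String)) : List (List (Int × Int)) :=
  (List.range (grid.headD []).length).flatMap
    (fun j => (KL grid j).map (fun r => pc grid j r grid.length))

theorem wc_succ (grid : List (List String)) (j i : Nat) :
    wc grid j (i + 1) = wc grid j i + (if pvCell grid i j = "#" then 1 else 0) := by
  unfold wc
  rw [List.range_succ, List.countP_append]
  by_cases h : pvCell grid i j = "#" <;> simp [h]

theorem wc_mono (grid : List (List String)) (j : Nat) {i i' : Nat} (h : i ≤ i') :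
    wc grid j i ≤ wc grid j i' := by
  unfold wc
  have : List.range i' = List.range i ++ (List.range (i' - i)).map (i + ·) := by
    rw [← List.range_add]; congr 1; omega
  rw [this, List.countP_append]
  omega

theorem wc_le (grid : List (List String)) (j i : Nat) : wc grid j i ≤ i := by
  simpa using (List.countP_le_length (l := List.range i) (p := fun k => pvCell grid k j = "#"))

theorem pc_succ (grid : List (List String)) (j r i : Nat) :
    pc grid j r (i + 1) = pc grid j r i ++
      (if pvCell grid i j ≠ "#" ∧ wc grid j i = r then [((i : Int), (j : Int))] else []) := by
  unfold pc
  rw [List.range_succ, List.filterMap_append]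
  congr 1
  by_cases h : pvCell grid i j ≠ "#" ∧ wc grid j i = r <;> simp [h]

theorem pc_eq_nil (grid : List (List String)) {j r i : Nat}
    (h : ∀ k < i, wc grid j k ≠ r) : pc grid j r i = [] := by
  unfold pc
  rw [List.filterMap_eq_nil_iff]
  intro k hk
  simp only [List.mem_range] at hk
  simp [h k hk]

theorem pc_ne_nil_iff (grid : List (List String)) (j r i : Nat) :
    pc grid j r i ≠ [] ↔ ∃ k < i, pvCell grid k j ≠ "#" ∧ wc grid j k = r := by
  unfold pc
  rw [Ne, List.filterMap_eq_nil_iff]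
  push_neg
  constructor
  · rintro ⟨k, hk, hne⟩
    simp only [List.mem_range] at hk
    refine ⟨k, hk, ?_⟩
    by_contra hc
    simp [hc] at hne
  · rintro ⟨k, hk, hc⟩
    exact ⟨k, by simpa using hk, by simp [hc]⟩

-- A's inner loop: flushed runs are the completed runs below the current wall count,
-- the pending run is the (possibly empty) run with the current wall count
theorem aInv (grid : List (List String)) (j : Nat) (rs : List (List (Int × Int))) (i : Nat) :
    (List.range i).foldl (aStep grid j) (rs, []) =
      (rs ++ ((List.range (wc grid j i)).filter (fun r => pc grid j r i ≠ [])).map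
          (fun r => pc grid j r i),
        pc grid j (wc grid j i) i) := by
  induction i with
  | zero => simp [wc, pc]
  | succ i ih =>
    rw [List.range_succ, List.foldl_append, ih]
    by_cases hw : pvCell grid i j = "#"
    · have hwc : wc grid j (i + 1) = wc grid j i + 1 := by rw [wc_succ]; simp [hw]
      have hpc : ∀ r, pc grid j r (i + 1) = pc grid j r i := by
        intro r; rw [pc_succ]; simp [hw]
      have hnil : pc grid j (wc grid j i + 1) i = [] := by
        apply pc_eq_nil
        intro k hk
        have := wc_mono grid j (show k ≤ i by omega)
        omega
      simp only [List.foldl_cons, List.foldl_nil, aStep, hw, hwc, hpc]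
      rw [List.range_succ, List.filter_append, List.map_append]
      by_cases hnz : pc grid j (wc grid j i) i ≠ [] <;> simp [hnz, hnil]
    · have hwc : wc grid j (i + 1) = wc grid j i := by rw [wc_succ]; simp [hw]
      have hpc : ∀ r, r < wc grid j i → pc grid j r (i + 1) = pc grid j r i := by
        intro r hr; rw [pc_succ]
        have : ¬ (pvCell grid i j ≠ "#" ∧ wc grid j i = r) := by omega
        simp [this]
      have hcur : pc grid j (wc grid j i) (i + 1)
          = pc grid j (wc grid j i) i ++ [((i : Int), (j : Int))] := by
        rw [pc_succ]; simp [hw]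
      simp only [List.foldl_cons, List.foldl_nil, aStep, hw, hwc, hcur, if_false]
      have hf : (List.range (wc grid j i)).filter (fun r => pc grid j r (i + 1) ≠ [])
          = (List.range (wc grid j i)).filter (fun r => pc grid j r i ≠ []) := by
        apply List.filter_congr
        intro r hr
        simp only [List.mem_range] at hr
        rw [hpc r hr]
      have hm : ((List.range (wc grid j i)).filter (fun r => pc grid j r i ≠ [])).map
            (fun r => pc grid j r (i + 1))
          = ((List.range (wc grid j i)).filter (fun r => pc grid j r i ≠ [])).map
            (fun r => pc grid j r i) := by
        apply List.map_congr_left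
        intro r hr
        have : r < wc grid j i := by simpa using (List.mem_filter.mp hr).1
        rw [hpc r this]
      rw [Prod.mk.injEq]
      refine ⟨?_, rfl⟩
      rw [hf, hm]

theorem Acol (grid : List (List String)) (j : Nat) (rs : List (List (Int × Int))) :
    aFlush ((List.range grid.length).foldl (aStep grid j) (rs, [])) =
      rs ++ (KL grid j).map (fun r => pc grid j r grid.length) := by
  rw [aInv]
  unfold aFlush KL
  have hle : wc grid j grid.length ≤ grid.length := wc_le grid j grid.length
  have hsplit : List.range (grid.length + 1)
      = List.range (wc grid j grid.length + 1)
        ++ (List.range (grid.length - wc grid j grid.length)).map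
             ((wc grid j grid.length + 1) + ·) := by
    rw [← List.range_add]; congr 1; omega
  rw [hsplit, List.filter_append, List.map_append]
  have h2 : ((List.range (grid.length - wc grid j grid.length)).map
        ((wc grid j grid.length + 1) + ·)).filter
        (fun r => pc grid j r grid.length ≠ []) = [] := by
    rw [List.filter_eq_nil_iff]
    intro r hr
    simp only [List.mem_map, List.mem_range] at hr
    obtain ⟨k, hk, rfl⟩ := hr
    have hnil : pc grid j (wc grid j grid.length + 1 + k) grid.length = [] := by
      apply pc_eq_nil
      intro k' hk'
      have := wc_mono grid j (le_of_lt hk')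
      omega
    simp [hnil]
  rw [h2, List.range_succ, List.filter_append, List.map_append]
  by_cases hnz : pc grid j (wc grid j grid.length) grid.length ≠ [] <;> simp [hnz]

theorem A_eq_spec (grid : List (List String)) :
    calculate_runs_north_south grid = specRuns grid := by
  unfold calculate_runs_north_south specRuns
  have gen : ∀ (l : List Nat) (rs : List (List (Int × Int))),
      l.foldl (fun runs j =>
        aFlush ((List.range grid.length).foldl (aStep grid j) (runs, []))) rs
      = rs ++ l.flatMap (fun j => (KL grid j).map (fun r => pc grid j r grid.length)) := by
    intro l
    induction l with
    | nil => simp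
    | cons x xs ih =>
      intro rs
      rw [List.foldl_cons, Acol, ih, List.flatMap_cons, List.append_assoc]
  simpa using gen (List.range (grid.headD []).length) []

-- B's inner loop over the columns of row i: each tagged cell is appended, walls[j] becomes
-- the wall count of row i+1 on the visited columns and is untouched elsewhere
theorem innerB (grid : List (List String)) (i : Nat) :
    ∀ (t s : Nat) (ws : List Int) (acc : List ((Int × Int) × (Int × Int))),
      s + t ≤ ws.length →
      (∀ j, s ≤ j → j < s + t → ws.getD j 0 = (wc grid j i : Int)) →
      ((List.range' s t).foldl (bStep grid i) (ws, acc)).2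
          = acc ++ (List.range' s t).filterMap (tagOf grid i)
        ∧ ((List.range' s t).foldl (bStep grid i) (ws, acc)).1.length = ws.length
        ∧ ∀ j, ((List.range' s t).foldl (bStep grid i) (ws, acc)).1.getD j 0
            = if s ≤ j ∧ j < s + t then (wc grid j (i + 1) : Int) else ws.getD j 0 := by
  intro t
  induction t with
  | zero =>
    intro s ws acc _ _
    refine ⟨by simp, rfl, ?_⟩
    intro j
    simp [(by omega : ¬ (s ≤ j ∧ j < s + 0))]
  | succ t ih =>
    intro s ws acc hlen hws
    rw [List.range'_succ, List.foldl_cons]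
    by_cases hw : pvCell grid i s = "#"
    · have hset : bStep grid i (ws, acc) s = (ws.set s (ws.getD s 0 + 1), acc) := by
        simp [bStep, hw]
      have hgs : ws.getD s 0 = (wc grid s i : Int) := hws s le_rfl (by omega)
      have hwcs : wc grid s (i + 1) = wc grid s i + 1 := by rw [wc_succ]; simp [hw]
      have hlen' : s + 1 + t ≤ (ws.set s (ws.getD s 0 + 1)).length := by
        rw [List.length_set]; omega
      have hws' : ∀ j, s + 1 ≤ j → j < s + 1 + t →
          (ws.set s (ws.getD s 0 + 1)).getD j 0 = (wc grid j i : Int) := by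
        intro j h1 h2
        have hne : s ≠ j := by omega
        rw [show (ws.set s (ws.getD s 0 + 1)).getD j 0 = ws.getD j 0 by
          simp [List.getD, hne]]
        exact hws j (by omega) (by omega)
      obtain ⟨h2, h3, h4⟩ := ih (s + 1) (ws.set s (ws.getD s 0 + 1)) acc hlen' hws'
      rw [hset]
      refine ⟨?_, by rw [h3, List.length_set], ?_⟩
      · rw [h2]
        simp [tagOf, hw]
      · intro j
        rw [h4 j]
        rcases Nat.lt_trichotomy j s with hlt | heq | hgt
        · rw [if_neg (by omega), if_neg (by omega)]
          simp [List.getD, (show s ≠ j by omega)]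
        · rw [heq, if_neg (by omega), if_pos (by omega)]
          have hsl : s < ws.length := by omega
          have hgs' : ws[s]?.getD 0 = (wc grid s i : Int) := hgs
          rw [List.getElem?_eq_getElem hsl] at hgs'
          simp only [Option.getD_some] at hgs'
          simp [List.getD, hsl, hgs', hwcs]
        · by_cases hin : j < s + 1 + t
          · rw [if_pos (by omega), if_pos (by omega)]
          · rw [if_neg (by omega), if_neg (by omega)]
            simp [List.getD, (show s ≠ j by omega)]
    · have hset : bStep grid i (ws, acc) s
          = (ws, acc ++ [(((s : Int), ws.getD s 0), ((i : Int), (s : Int)))]) := by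
        simp [bStep, hw]
      have hgs : ws.getD s 0 = (wc grid s i : Int) := hws s le_rfl (by omega)
      have hwcs : wc grid s (i + 1) = wc grid s i := by rw [wc_succ]; simp [hw]
      obtain ⟨h2, h3, h4⟩ := ih (s + 1) ws
        (acc ++ [(((s : Int), ws.getD s 0), ((i : Int), (s : Int)))])
        (by omega) (fun j h1 h2 => hws j (by omega) (by omega))
      rw [hset]
      refine ⟨?_, h3, ?_⟩
      · rw [h2]
        have hgs' : ws[s]?.getD 0 = (wc grid s i : Int) := hgs
        simp [tagOf, hw, hgs']
      · intro j
        rw [h4 j]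
        rcases Nat.lt_trichotomy j s with hlt | heq | hgt
        · rw [if_neg (by omega), if_neg (by omega)]
        · rw [heq, if_neg (by omega), if_pos (by omega), hgs, hwcs]
        · by_cases hin : j < s + 1 + t
          · rw [if_pos (by omega), if_pos (by omega)]
          · rw [if_neg (by omega), if_neg (by omega)]

theorem outerB (grid : List (List String)) (i : Nat) :
    ((List.range i).foldl
        (fun st i' => (List.range (grid.headD []).length).foldl (bStep grid i') st)
        (List.replicate (grid.headD []).length 0, [])).1.length
      = (grid.headD []).length
    ∧ (∀ j < (grid.headD []).length,
        ((List.range i).foldl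
          (fun st i' => (List.range (grid.headD []).length).foldl (bStep grid i') st)
          (List.replicate (grid.headD []).length 0, [])).1.getD j 0 = (wc grid j i : Int))
    ∧ ((List.range i).foldl
        (fun st i' => (List.range (grid.headD []).length).foldl (bStep grid i') st)
        (List.replicate (grid.headD []).length 0, [])).2
      = (List.range i).flatMap
          (fun i' => (List.range (grid.headD []).length).filterMap (tagOf grid i')) := by
  induction i with
  | zero =>
    refine ⟨by simp, ?_, by simp⟩
    intro j hj
    simp [List.getD_replicate _ hj, wc]
  | succ i ih =>
    obtain ⟨ih1, ih2, ih3⟩ := ih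
    rw [List.range_succ, List.foldl_append, List.foldl_cons, List.foldl_nil]
    set st := (List.range i).foldl
      (fun st i' => (List.range (grid.headD []).length).foldl (bStep grid i') st)
      (List.replicate (grid.headD []).length 0, []) with hst
    have hrange : List.range (grid.headD []).length
        = List.range' 0 (grid.headD []).length := List.range_eq_range'
    have hin := innerB grid i (grid.headD []).length 0 st.1 st.2
      (by omega) (by intro j h1 h2; exact ih2 j (by omega))
    rw [hrange]
    obtain ⟨h2, h3, h4⟩ := hin
    rw [show (List.range' 0 (grid.headD []).length).foldl (bStep grid i) (st.1, st.2)
        = (List.range' 0 (grid.headD []).length).foldl (bStep grid i) st from by rfl] at h2 h3 h4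
    refine ⟨by rw [h3, ih1], ?_, ?_⟩
    · intro j hj
      rw [h4 j, if_pos ⟨by omega, by omega⟩]
    · rw [h2, ih3, List.flatMap_append]
      rw [← hrange]
      simp

theorem tagged_eq (grid : List (List String)) :
    bTagged grid = (List.range grid.length).flatMap
      (fun i => (List.range (grid.headD []).length).filterMap (tagOf grid i)) := by
  exact (outerB grid grid.length).2.2

-- one tagged row filtered down to a single run id
theorem rowFilter (grid : List (List String)) (i j r M : Nat) :
    ((List.range M).filterMap (tagOf grid i)).filter
        (fun p => p.1 == ((j : Int), (r : Int)))
      = if j < M ∧ pvCell grid i j ≠ "#" ∧ wc grid j i = r then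
          [(((j : Int), (r : Int)), ((i : Int), (j : Int)))]
        else [] := by
  induction M with
  | zero => simp
  | succ M ih =>
    rw [List.range_succ, List.filterMap_append, List.filter_append, ih]
    by_cases hM : j = M
    · subst hM
      by_cases hw : pvCell grid i j ≠ "#"
      · by_cases hr : wc grid j i = r
        · rw [if_neg (by omega), if_pos ⟨by omega, hw, hr⟩]
          simp [tagOf, hw, hr]
        · rw [if_neg (by omega), if_neg (by simp [hr])]
          simp only [tagOf, if_pos hw]
          simp [hr]
      · rw [if_neg (by omega), if_neg (by simp [hw])]
        simp [tagOf, hw]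
    · have hif : ((j < M + 1 ∧ pvCell grid i j ≠ "#" ∧ wc grid j i = r))
          ↔ (j < M ∧ pvCell grid i j ≠ "#" ∧ wc grid j i = r) := by
        constructor <;> rintro ⟨h1, h2⟩ <;> exact ⟨by omega, h2⟩
      rw [if_congr hif rfl rfl]
      have hdrop : (List.filterMap (tagOf grid i) [M]).filter
          (fun p => p.1 == ((j : Int), (r : Int))) = [] := by
        by_cases hw : pvCell grid i M ≠ "#"
        · simp only [List.filterMap_cons, List.filterMap_nil, tagOf, if_pos hw]
          have : ¬ (((M : Int), (wc grid M i : Int)) = ((j : Int), (r : Int))) := by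
            intro h
            apply hM
            have := congrArg Prod.fst h
            simp at this
            omega
          simp [this]
        · simp [tagOf, hw]
      rw [hdrop, List.append_nil]

theorem flatMap_if_singleton {α β : Type} (l : List α) (P : α → Prop) [DecidablePred P]
    (f : α → β) :
    l.flatMap (fun x => if P x then [f x] else [])
      = l.filterMap (fun x => if P x then some (f x) else none) := by
  induction l with
  | nil => rfl
  | cons x xs ih =>
    rw [List.flatMap_cons, List.filterMap_cons, ih]
    by_cases h : P x <;> simp [h]

theorem getD_groups (grid : List (List String)) (j r : Nat)
    (hj : j < (grid.headD []).length) :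
    (bGroups grid).getD ((j : Int), (r : Int)) [] = pc grid j r grid.length := by
  unfold bGroups
  rw [PySem.Dict.getD_foldl_modify_append, tagged_eq, PySem.Dict.getD_empty]
  rw [List.filter_flatMap, List.map_flatMap]
  unfold pc
  rw [← flatMap_if_singleton, List.nil_append]
  congr 1
  funext i
  rw [rowFilter]
  by_cases h : pvCell grid i j ≠ "#" ∧ wc grid j i = r
  · rw [if_pos ⟨hj, h.1, h.2⟩, if_pos h]
    rfl
  · rw [if_neg (by tauto), if_neg h]
    rfl

theorem keys_groups (grid : List (List String)) :
    (bGroups grid).keys = PySem.Set.ofList ((bTagged grid).map (fun p => p.1)) := by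
  unfold bGroups
  rw [PySem.Dict.keys_foldl_modify_key (bTagged grid) (fun p => p.1) []
    (fun _ p => fun x => x ++ [p.2]) PySem.Dict.empty]
  rw [PySem.Dict.keys_empty]
  rfl

theorem nodup_keys_groups (grid : List (List String)) : (bGroups grid).keys.Nodup := by
  rw [keys_groups]
  exact PySem.Set.nodup_ofList _

theorem mem_KLpairs_iff (grid : List (List String)) (c : Int × Int) :
    c ∈ KLpairs grid ↔ ∃ j < (grid.headD []).length, ∃ r < grid.length + 1,
      pc grid j r grid.length ≠ [] ∧ c = ((j : Int), (r : Int)) := by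
  unfold KLpairs KL
  rw [List.mem_flatMap]
  constructor
  · rintro ⟨j, hjm, hc⟩
    rw [List.mem_map] at hc
    obtain ⟨r, hrm, rfl⟩ := hc
    rw [List.mem_filter] at hrm
    obtain ⟨hr, hne⟩ := hrm
    exact ⟨j, by simpa using hjm, r, by simpa using hr, by simpa using hne, rfl⟩
  · rintro ⟨j, hj, r, hr, hne, rfl⟩
    refine ⟨j, by simpa using hj, ?_⟩
    rw [List.mem_map]
    exact ⟨r, List.mem_filter.mpr ⟨by simpa using hr, by simpa using hne⟩, rfl⟩

theorem mem_keys_iff (grid : List (List String)) (c : Int × Int) :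
    c ∈ (bGroups grid).keys ↔ c ∈ KLpairs grid := by
  rw [keys_groups, PySem.Set.mem_ofList, tagged_eq, mem_KLpairs_iff]
  simp only [List.mem_map, List.mem_flatMap, List.mem_filterMap, List.mem_range]
  constructor
  · rintro ⟨p, ⟨i, hi, ⟨j, hj, htag⟩⟩, rfl⟩
    unfold tagOf at htag
    by_cases hw : pvCell grid i j ≠ "#"
    · rw [if_pos hw] at htag
      cases htag
      refine ⟨j, hj, wc grid j i, ?_, ?_, rfl⟩
      · have := wc_le grid j i
        omega
      · rw [pc_ne_nil_iff]
        exact ⟨i, hi, hw, rfl⟩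
    · rw [if_neg hw] at htag
      cases htag
  · rintro ⟨j, hj, r, hr, hne, rfl⟩
    rw [pc_ne_nil_iff] at hne
    obtain ⟨k, hk, hw, hwc⟩ := hne
    refine ⟨(((j : Int), (r : Int)), ((k : Int), (j : Int))), ⟨k, hk, j, hj, ?_⟩, rfl⟩
    unfold tagOf
    rw [if_pos hw, hwc]

theorem pairwise_KLpairs (grid : List (List String)) :
    (KLpairs grid).Pairwise (fun a b => toLex a < toLex b) := by
  unfold KLpairs
  rw [List.pairwise_flatMap]
  constructor
  · intro j _
    rw [List.pairwise_map]
    refine List.Pairwise.imp ?_ ((List.pairwise_lt_range).filter _)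
    intro r1 r2 h
    rw [Prod.Lex.lt_iff]
    right
    refine ⟨rfl, ?_⟩
    simp only [ofLex_toLex]
    exact_mod_cast h
  · refine List.Pairwise.imp ?_ List.pairwise_lt_range
    intro j1 j2 hj x hx y hy
    rw [List.mem_map] at hx hy
    obtain ⟨r1, _, rfl⟩ := hx
    obtain ⟨r2, _, rfl⟩ := hy
    rw [Prod.Lex.lt_iff]
    left
    simp only [ofLex_toLex]
    exact_mod_cast hj

theorem nodup_KLpairs (grid : List (List String)) : (KLpairs grid).Nodup :=
  (pairwise_KLpairs grid).imp (fun h heq => by subst heq; exact lt_irrefl _ h)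

theorem sorted2_eq_sorted_toLex (xs : List (Int × Int)) :
    PySem.List.sorted2 xs Prod.fst Prod.snd false
      = PySem.List.sorted xs (fun x => toLex x) false := by
  have hbe : (fun (a b : Int × Int) => decide (a.1 < b.1) || (!decide (b.1 < a.1) && decide (a.2 < b.2)))
      = (fun (a b : Int × Int) => decide (toLex a < toLex b)) := by
    funext a b
    rcases lt_trichotomy a.1 b.1 with h | h | h <;> simp [Prod.Lex.lt_iff, h] <;> omega
  simp [PySem.List.sorted2, PySem.List.sorted, hbe]

theorem B_eq_spec (grid : List (List String)) :
    calculate_runs_north_south_alt grid = specRuns grid := by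
  unfold calculate_runs_north_south_alt
  rw [sorted2_eq_sorted_toLex]
  have hperm : (KLpairs grid).Perm (bGroups grid).keys := by
    rw [List.perm_ext_iff_of_nodup (nodup_KLpairs grid) (nodup_keys_groups grid)]
    intro a
    rw [mem_keys_iff]
  rw [PySem.List.sorted_eq_of_perm_of_pairwise_lt _ (KLpairs grid) _ hperm
    (pairwise_KLpairs grid)]
  unfold specRuns KLpairs
  rw [List.map_flatMap]
  apply List.flatMap_congr
  intro j hj
  rw [List.map_map]
  apply List.map_congr_left
  intro r hr
  exact getD_groups grid j r (List.mem_range.mp hj)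

-- ===== VERDICT (by name: the statement is the Claim_ definition above) =====
theorem calculate_runs_north_south_spec : Claim_equal_calculate_runs_north_south := by
  intro grid _ _
  unfold Spec_calculate_runs_north_south
  exact (A_eq_spec grid).trans (B_eq_spec grid).symm
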